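-- pv_equiv track=rewrite | github.com/myoung-space-science/goats | src/goats/common/algebra.py | entire
-- ===== SOURCE A (Python) =====
-- def entire(string: str, opening: str, closing: str):
--     """True if `string` is completely bounded by separators."""
--     counted = False
--     count = 0
--     if string[0] != opening or string[-1] != closing:
--         return False
--     for i, c in enumerate(string):
--         if c == opening:
--             count += 1
--             counted = not counted or True # Once true, always true.
--         elif c == closing:
--             count -= 1
--         if counted and count == 0 and i < len(string)-1:
--             return False
--     return counted and count == 0
-- ===== SOURCE B (Python) =====
-- def entire(string, opening, closing):
--     """True if `string` is completely bounded by separators."""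
--     if string[0] != opening or string[-1] != closing:
--         return False
--     # canonicalize: keep only the separator occurrences, opening taking
--     # precedence (as in A's if/elif), as a bracket word
--     seps = ''.join('(' if c == opening else ')'
--                    for c in string if c == opening or c == closing)
--     if seps[-1] != ')':
--         return False
--     # string is entire iff seps = '(' + D + ')' with D a balanced (Dyck)
--     # bracket word: decide that by rewriting, deleting matched pairs
--     inner = seps[1:-1]
--     i = inner.find('()')
--     while i != -1:
--         inner = inner[:i] + inner[i + 2:]
--         i = inner.find('()')
--     return inner == ''
-- ===== Notes on version B (the rewrite author's own statement) =====
-- stated objective: alternative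
-- what changed: A's fused early-exit counter scan is replaced by canonicalizing the separator occurrences into a bracket word and deciding enclosure by string rewriting: repeatedly deleting matched '()' pairs and testing whether the interior reduces to the empty word.
import Mathlib
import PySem

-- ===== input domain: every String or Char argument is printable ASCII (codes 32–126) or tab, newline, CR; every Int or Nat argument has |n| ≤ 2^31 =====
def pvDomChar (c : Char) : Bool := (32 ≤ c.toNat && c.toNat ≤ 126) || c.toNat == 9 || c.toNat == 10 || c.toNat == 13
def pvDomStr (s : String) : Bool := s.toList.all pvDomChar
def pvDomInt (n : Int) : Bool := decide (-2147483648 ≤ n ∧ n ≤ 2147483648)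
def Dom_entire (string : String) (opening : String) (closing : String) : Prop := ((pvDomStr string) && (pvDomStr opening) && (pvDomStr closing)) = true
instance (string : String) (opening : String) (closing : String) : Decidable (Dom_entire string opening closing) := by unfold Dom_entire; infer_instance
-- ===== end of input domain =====

-- B replaces A's fused counter scan by a different algorithm: it canonicalizes the
-- separator occurrences into a bracket word and decides enclosure by string rewriting
-- (repeatedly deleting matched "()" pairs); objective: alternative, not faster.

-- ===== PORT A =====
-- A's for-loop over enumerate(string): i is the running index, state (counted, count).
def entireLoopA (opening closing : String) (len : Nat) : Nat → Bool → Int → List Char → Bool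
  | _, counted, count, [] => counted && (count == 0)
  | i, counted, count, c :: cs =>
      let st :=
        if String.mk [c] = opening then (count + 1, (!counted || true))
        else if String.mk [c] = closing then (count - 1, counted)
        else (count, counted)
      if st.2 && (st.1 == 0) && decide (i < len - 1) then false
      else entireLoopA opening closing len (i + 1) st.2 st.1 cs

def entire (string : String) (opening : String) (closing : String) : Bool :=
  match PySem.List.pyGet? string.toList 0, PySem.List.pyGet? string.toList (-1) with
  | some c0, some cl =>
      if String.mk [c0] ≠ opening ∨ String.mk [cl] ≠ closing then false
      else entireLoopA opening closing string.toList.length 0 false 0 string.toList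
  | _, _ => false  -- unreachable under Pre_entire (IndexError in Python)

-- ===== PORT B =====
-- the comprehension's per-character action: '(' if c == opening else ')', filtered on sep
def canonB (opening closing : String) (c : Char) : Option Char :=
  if String.mk [c] = opening then some '('
  else if String.mk [c] = closing then some ')' else none

-- B's while loop: delete the leftmost "()" until none is left (fuel = initial length,
-- an upper bound on the number of iterations since each one deletes two characters)
def reduceB : Nat → List Char → List Char
  | 0, l => l
  | fuel + 1, l =>
      let i := PySem.Chars.find l ['(', ')']
      if i = -1 then l
      else reduceB fuel (PySem.List.slice l none (some i) ++ PySem.List.slice l (some (i + 2)) none)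

def entire_alt (string : String) (opening : String) (closing : String) : Bool :=
  match PySem.List.pyGet? string.toList 0 with
  | none => false  -- unreachable under Pre_entire (IndexError in Python)
  | some c0 =>
    match PySem.List.pyGet? string.toList (-1) with
    | none => false  -- unreachable under Pre_entire (IndexError in Python)
    | some cl =>
      if String.mk [c0] ≠ opening ∨ String.mk [cl] ≠ closing then false
      else
        let seps := string.toList.filterMap (canonB opening closing)
        match PySem.List.pyGet? seps (-1) with
        | none => false  -- unreachable: the guard makes string[0] a separator
        | some sl =>
          if sl ≠ ')' then false
          else
            let inner := PySem.List.slice seps (some 1) (some (-1))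
            decide (reduceB inner.length inner = [])

-- ===== PRECONDITION & SPEC =====
-- Pre_ excludes only the empty string, on which both A and B raise IndexError at string[0].
def Pre_entire (string : String) (opening : String) (closing : String) : Prop := string ≠ ""
instance (string : String) (opening : String) (closing : String) : Decidable (Pre_entire string opening closing) := by unfold Pre_entire; infer_instance
def pvWitness_entire : String × String × String := ("(a)", "(", ")")

def Spec_entire (string : String) (opening : String) (closing : String) (out : Bool) : Prop := out = entire_alt string opening closing
instance (string : String) (opening : String) (closing : String) (out : Bool) : Decidable (Spec_entire string opening closing out) := by unfold Spec_entire; infer_instance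

-- ===== CLAIM (what is proved, stated in full; the proofs are below) =====
def Claim_equal_entire : Prop := ∀ (string : String) (opening : String) (closing : String), Dom_entire string opening closing → Pre_entire string opening closing → Spec_entire string opening closing (entire string opening closing)

-- ===== LEMMAS AND PROOFS =====

-- A's per-character balance delta
def deltaA (opening closing : String) (c : Char) : Int :=
  if String.mk [c] = opening then 1 else if String.mk [c] = closing then -1 else 0

-- bracket delta on canonical characters
def deltaC (c : Char) : Int := if c = '(' then 1 else -1

-- intermediate recursion (proof-only): A's loop after the first step, counted = true,
-- with the index test "i < len-1" replaced by "rest nonempty"; f is the per-char delta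
def chk (f : Char → Int) : Int → List Char → Bool
  | count, [] => count == 0
  | count, c :: cs =>
      if count + f c = 0 ∧ cs ≠ [] then false else chk f (count + f c) cs

-- "count stays nonzero along the word" (running from s)
def sp : Int → List Char → Bool
  | _, [] => true
  | s, c :: l => decide (s + deltaC c ≠ 0) && sp (s + deltaC c) l

-- "running sum stays nonnegative" (classical Dyck prefix condition)
def nn : Int → List Char → Bool
  | s, [] => decide (0 ≤ s)
  | s, c :: l => decide (0 ≤ s) && nn (s + deltaC c) l

def sumC (l : List Char) : Int := (l.map deltaC).sum

def dyck (l : List Char) : Bool := nn 0 l && decide (sumC l = 0)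

def allParen (l : List Char) : Prop := ∀ c ∈ l, c = '(' ∨ c = ')'

theorem loopA_eq_chk (opening closing : String) (len : Nat) :
    ∀ (cs : List Char) (i : Nat) (count : Int), i + cs.length = len →
      entireLoopA opening closing len i true count cs
        = chk (deltaA opening closing) count cs := by
  intro cs
  induction cs with
  | nil => intro i count h; simp [entireLoopA, chk]
  | cons c cs ih =>
      intro i count h
      simp only [List.length_cons] at h
      have hidx : (i < len - 1) ↔ cs ≠ [] := by
        cases cs with
        | nil => simp at h ⊢; omega
        | cons a as => simp at h ⊢; omega
      simp only [entireLoopA, chk, deltaA]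
      by_cases hop : String.mk [c] = opening
      · have hrec := ih (i + 1) (count + 1) (by omega)
        clear ih
        by_cases h0 : count + 1 = 0 <;> simp_all [hop]
      · by_cases hcl : String.mk [c] = closing
        · have hrec := ih (i + 1) (count - 1) (by omega)
          clear ih
          have he : count + (-1 : Int) = count - 1 := by ring
          by_cases h0 : count - 1 = 0 <;> simp_all [hop, hcl, he]
        · have hrec := ih (i + 1) count (by omega)
          clear ih
          by_cases h0 : count = 0 <;> simp_all [hop, hcl]

-- canonB agrees with deltaA where it yields a bracket …
theorem deltaA_canonB (opening closing : String) (c b : Char)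
    (h : canonB opening closing c = some b) : deltaA opening closing c = deltaC b := by
  unfold canonB at h
  by_cases hop : String.mk [c] = opening
  · rw [if_pos hop] at h
    have hb : b = '(' := by injection h with h'; exact h'.symm
    subst hb
    unfold deltaA deltaC
    rw [if_pos hop]
    simp
  · rw [if_neg hop] at h
    by_cases hcl : String.mk [c] = closing
    · rw [if_pos hcl] at h
      have hb : b = ')' := by injection h with h'; exact h'.symm
      subst hb
      unfold deltaA deltaC
      rw [if_neg hop, if_pos hcl]
      simp
    · rw [if_neg hcl] at h
      exact absurd h (by simp)

-- … and deltaA is 0 where canonB is none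
theorem deltaA_none (opening closing : String) (c : Char)
    (h : canonB opening closing c = none) : deltaA opening closing c = 0 := by
  unfold canonB at h
  by_cases hop : String.mk [c] = opening
  · rw [if_pos hop] at h
    exact absurd h (by simp)
  · rw [if_neg hop] at h
    by_cases hcl : String.mk [c] = closing
    · rw [if_pos hcl] at h
      exact absurd h (by simp)
    · unfold deltaA
      rw [if_neg hop, if_neg hcl]

-- the fused scan over the raw string equals the scan over the canonical bracket word,
-- provided the count is nonzero and the last character is a separator
theorem chk_filterMap (opening closing : String) :
    ∀ (cs : List Char) (count : Int), count ≠ 0 →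
      (∀ d ∈ cs.getLast?, (canonB opening closing d).isSome) →
      chk (deltaA opening closing) count cs
        = chk deltaC count (cs.filterMap (canonB opening closing)) := by
  intro cs
  induction cs with
  | nil => intro count _ _; simp [chk]
  | cons c cs ih =>
      intro count hc Hl
      have Hl' : ∀ d ∈ cs.getLast?, (canonB opening closing d).isSome := by
        intro d hd
        apply Hl
        cases cs with
        | nil => simp at hd
        | cons a as => simpa [List.getLast?_cons_cons] using hd
      cases hg : canonB opening closing c with
      | none =>
          have hd0 : deltaA opening closing c = 0 := deltaA_none _ _ _ hg
          simp only [chk, hd0, add_zero, List.filterMap_cons_none hg]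
          rw [if_neg (by tauto)]
          cases hcs : cs with
          | nil => simp [chk]
          | cons a as => rw [← hcs]; exact ih count hc Hl'
      | some b =>
          have hdb : deltaA opening closing c = deltaC b := deltaA_canonB _ _ _ _ hg
          simp only [chk, hdb, List.filterMap_cons_some hg]
          by_cases h0 : count + deltaC b = 0
          · by_cases hcs : cs = []
            · rw [if_neg (by simp [hcs]), if_neg (by simp [hcs])]
              simp [hcs, chk]
            · have hLne : cs.filterMap (canonB opening closing) ≠ [] := by
                obtain ⟨d, hd⟩ := Option.isSome_iff_exists.mp (List.getLast?_isSome.mpr hcs)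
                have hds := Hl' d (by simp [hd])
                obtain ⟨e, he⟩ := Option.isSome_iff_exists.mp hds
                have : e ∈ cs.filterMap (canonB opening closing) :=
                  List.mem_filterMap.mpr ⟨d, List.mem_of_getLast? hd, he⟩
                intro hnil; rw [hnil] at this; simp at this
              rw [if_pos ⟨h0, hcs⟩, if_pos ⟨h0, hLne⟩]
          · rw [if_neg (by tauto), if_neg (by tauto)]
            cases hcs : cs with
            | nil => simp [chk]
            | cons a as => rw [← hcs]; exact ih _ h0 Hl'

-- chk on a word with its last character split off: interior nonzero + final balance
theorem chk_concat (M : List Char) : ∀ (b : Char) (s : Int),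
    chk deltaC s (M ++ [b]) = (sp s M && decide (s + sumC M + deltaC b = 0)) := by
  induction M with
  | nil =>
      intro b s
      simp only [List.nil_append, chk, sp, sumC]
      rw [if_neg (by simp)]
      simp only [chk, List.map_nil, List.sum_nil, add_zero, Bool.true_and]
      by_cases h : s + deltaC b = 0 <;> simp [h]
  | cons c M ih =>
      intro b s
      simp only [List.cons_append, chk, sp]
      by_cases h0 : s + deltaC c = 0
      · rw [if_pos ⟨h0, by simp⟩]
        simp [h0]
      · rw [if_neg (by tauto), ih]
        have : s + sumC (c :: M) = (s + deltaC c) + sumC M := by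
          simp [sumC]; ring
        rw [this]
        simp [h0]

theorem nn_neg (l : List Char) (s : Int) (h : s < 0) : nn s l = false := by
  cases l <;> simp [nn] <;> omega

theorem sp_eq_nn (M : List Char) : ∀ (s : Int), 0 ≤ s → sp (s + 1) M = nn s M := by
  induction M with
  | nil => intro s hs; simpa [sp, nn] using hs
  | cons c M ih =>
      intro s hs
      by_cases hc : c = '('
      · have h1 : s + 1 + deltaC c = (s + 1) + 1 := by simp only [deltaC, if_pos hc]
        have h2 : s + deltaC c = s + 1 := by simp only [deltaC, if_pos hc]
        simp only [sp, nn, h1, h2]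
        rw [ih (s + 1) (by omega)]
        rw [decide_eq_true (show s + 1 + 1 ≠ (0 : Int) by omega), decide_eq_true hs]
      · have h1 : s + 1 + deltaC c = s := by simp only [deltaC, if_neg hc]; ring
        have h2 : s + deltaC c = s - 1 := by simp only [deltaC, if_neg hc]; ring
        simp only [sp, nn, h1, h2]
        by_cases hz : s = 0
        · subst hz
          rw [nn_neg _ _ (by norm_num)]
          simp
        · have : sp s M = sp ((s - 1) + 1) M := by norm_num
          rw [this, ih (s - 1) (by omega)]
          simp [hs]; omega

theorem nn_sum (l : List Char) : ∀ (s : Int), nn s l = true → 0 ≤ s + sumC l := by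
  induction l with
  | nil => intro s h; simp [nn] at h; simpa [sumC] using h
  | cons c l ih =>
      intro s h
      simp only [nn, Bool.and_eq_true, decide_eq_true_eq] at h
      have h2 := ih _ h.2
      have he : s + sumC (c :: l) = (s + deltaC c) + sumC l := by simp [sumC]; ring
      rw [he]
      exact h2

theorem nn_append_pair (x : List Char) : ∀ (y : List Char) (s : Int),
    nn s (x ++ '(' :: ')' :: y) = nn s (x ++ y) := by
  induction x with
  | nil =>
      intro y s
      by_cases hs : 0 ≤ s
      · simp only [List.nil_append, nn]
        rw [show s + deltaC '(' + deltaC ')' = s by simp [deltaC]]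
        rw [show s + deltaC '(' = s + 1 by simp [deltaC]]
        rw [decide_eq_true hs, decide_eq_true (show (0:Int) ≤ s + 1 by omega)]
        simp
      · rw [nn_neg _ _ (by omega), nn_neg _ _ (by omega)]
  | cons c x ih =>
      intro y s
      simp only [List.cons_append, nn, ih]

theorem sumC_append (x y : List Char) : sumC (x ++ y) = sumC x + sumC y := by
  simp [sumC]

theorem dyck_del (x y : List Char) : dyck (x ++ '(' :: ')' :: y) = dyck (x ++ y) := by
  unfold dyck
  rw [nn_append_pair]
  have h2 : sumC ('(' :: ')' :: y) = sumC y := by simp [sumC, deltaC]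
  rw [sumC_append, sumC_append, h2]

-- a nonempty all-open word follows any word with no "()" factor that starts with '('
theorem no_pat_tail (t : List Char) : allParen t → ¬ (['(', ')'] <:+: ('(' :: t)) →
    t = List.replicate t.length '(' := by
  induction t with
  | nil => intro _ _; simp
  | cons c t ih =>
      intro hap hno
      have hc : c = '(' := by
        rcases hap c (by simp) with h | h
        · exact h
        · exact absurd ⟨[], t, by simp [h]⟩ hno
      subst hc
      have hno' : ¬ (['(', ')'] <:+: ('(' :: t)) := fun hinf =>
        hno (hinf.trans (List.suffix_cons _ _).isInfix)
      have ht := ih (fun d hd => hap d (by simp [hd])) hno'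
      rw [List.length_cons, List.replicate_succ, ← ht]

theorem sumC_replicate_open (n : Nat) : sumC (List.replicate n '(') = n := by
  induction n with
  | zero => simp [sumC]
  | succ n ih => simp [List.replicate_succ, sumC, deltaC] at ih ⊢; omega

-- a Dyck word over brackets with no "()" factor is empty
theorem dyck_no_pat (l : List Char) (hap : allParen l) (hno : ¬ (['(', ')'] <:+: l))
    (hd : dyck l = true) : l = [] := by
  cases l with
  | nil => rfl
  | cons c t =>
      exfalso
      unfold dyck at hd
      simp only [Bool.and_eq_true, decide_eq_true_eq] at hd
      have hc : c = '(' := by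
        rcases hap c (by simp) with h | h
        · exact h
        · exfalso
          have := hd.1
          simp only [nn, h] at this
          have h2 : (0 : Int) + deltaC ')' = -1 := by simp [deltaC]
          rw [h2, nn_neg _ _ (by norm_num)] at this
          simp at this
      subst hc
      have ht := no_pat_tail t (fun d hdm => hap d (by simp [hdm])) hno
      have hs := hd.2
      have hrep : ('(' :: t) = List.replicate (t.length + 1) '(' := by
        rw [List.replicate_succ, ← ht]
      rw [hrep, sumC_replicate_open] at hs
      omega

-- the rewriting loop empties the word exactly on Dyck words (fuel ≥ half the length suffices)
theorem reduceB_eq_nil_iff (fuel : Nat) : ∀ (l : List Char), allParen l → l.length ≤ 2 * fuel →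
    ((reduceB fuel l = []) ↔ dyck l = true) := by
  induction fuel with
  | zero =>
      intro l hap hlen
      have : l = [] := by cases l <;> simp_all
      subst this
      simp [reduceB, dyck, nn, sumC]
  | succ fuel ih =>
      intro l hap hlen
      simp only [reduceB]
      by_cases hfind : PySem.Chars.find l ['(', ')'] = -1
      · rw [if_pos hfind]
        have hno : ¬ (['(', ')'] <:+: l) := (PySem.Chars.find_eq_neg_one_iff _ _).mp hfind
        constructor
        · intro h; subst h; simp [dyck, nn, sumC]
        · intro h; exact dyck_no_pat l hap hno h
      · rw [if_neg hfind]
        set i := PySem.Chars.find l ['(', ')'] with hi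
        have hinf : ['(', ')'] <:+: l := by
          have := PySem.Chars.find_ne_neg_one_iff (s := l) (sub := ['(', ')'])
          exact this.mp hfind
        have hpos : 0 ≤ i := (PySem.Chars.find_nonneg_iff _ _).mpr hinf
        have hspec := PySem.Chars.find_spec (s := l) (sub := ['(', ')']) hpos
        obtain ⟨y, hy⟩ := hspec.1
        have hl : l = l.take i.toNat ++ ('(' :: ')' :: y) := by
          conv_lhs => rw [← List.take_append_drop i.toNat l]
          rw [← hy]; rfl
        have hs1 : PySem.List.slice l none (some i) = l.take i.toNat :=
          PySem.List.slice_to l hpos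
        have hs2 : PySem.List.slice l (some (i + 2)) none = y := by
          rw [PySem.List.slice_from l (by omega)]
          have h2 : (i + 2).toNat = i.toNat + 2 := by omega
          rw [h2, ← List.drop_drop, ← hy]
          rfl
        rw [hs1, hs2]
        have hlen2 : l.length = i.toNat + 2 + y.length := by
          have hd : (l.drop i.toNat).length = l.length - i.toNat := by simp
          have hle : i.toNat ≤ l.length := by
            by_contra hgt
            push_neg at hgt
            have : l.drop i.toNat = [] := List.drop_eq_nil_of_le (by omega)
            rw [this] at hy; simp at hy
          rw [← hy] at hd
          simp at hd
          omega
        have htk : (l.take i.toNat).length = i.toNat := by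
          simp; omega
        have hap' : allParen (l.take i.toNat ++ y) := by
          intro d hd
          rcases List.mem_append.mp hd with h | h
          · exact hap d (List.mem_of_mem_take h)
          · exact hap d (by rw [hl]; exact List.mem_append_right _ (by simp [h]))
        rw [ih (l.take i.toNat ++ y) hap' (by simp [htk]; omega)]
        conv_rhs => rw [hl]
        rw [dyck_del]

-- the canonical word contains only brackets
theorem allParen_filterMap (opening closing : String) (cs : List Char) :
    allParen (cs.filterMap (canonB opening closing)) := by
  intro e he
  obtain ⟨d, _, hd⟩ := List.mem_filterMap.mp he
  unfold canonB at hd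
  by_cases hop : String.mk [d] = opening
  · rw [if_pos hop] at hd
    left; injection hd with h; exact h.symm
  · rw [if_neg hop] at hd
    by_cases hcl : String.mk [d] = closing
    · rw [if_pos hcl] at hd
      right; injection hd with h; exact h.symm
    · rw [if_neg hcl] at hd
      exact absurd hd (by simp)

-- the A-side scan on the canonical word with its last bracket split off is dyck-ness
theorem chk_concat_dyck (M : List Char) (b : Char) (hap : allParen (M ++ [b])) :
    chk deltaC 1 (M ++ [b]) = ((b == ')') && dyck M) := by
  rw [chk_concat]
  have hsp : sp 1 M = nn 0 M := by simpa using sp_eq_nn M 0 (le_refl 0)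
  by_cases hb : b = ')'
  · subst hb
    have hiff : ∀ t : Int, (1 + t + deltaC ')' = 0) ↔ (t = 0) := by
      intro t; simp [deltaC]
    have hde : decide (1 + sumC M + deltaC ')' = 0) = decide (sumC M = 0) :=
      decide_eq_decide.mpr (hiff (sumC M))
    rw [hsp, hde]
    simp [dyck]
  · have hb' : b = '(' := by
      rcases hap b (by simp) with h | h
      · exact h
      · exact absurd h hb
    subst hb'
    by_cases hnn : nn 0 M = true
    · have hge : 0 ≤ sumC M := by simpa using nn_sum M 0 hnn
      have hne : ∀ t : Int, 0 ≤ t → ¬ (1 + t + deltaC '(' = 0) := by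
        intro t ht; simp [deltaC]; omega
      rw [hsp, hnn, decide_eq_false (hne (sumC M) hge)]
      simp
    · rw [Bool.not_eq_true] at hnn
      rw [hsp]
      simp [dyck, hnn]

-- main equivalence
theorem entire_eq_alt (string opening closing : String) (hpre : string ≠ "") :
    entire string opening closing = entire_alt string opening closing := by
  unfold entire entire_alt
  have hne : string.toList ≠ [] := by
    intro h
    apply hpre
    rw [← String.toList_inj, h]; rfl
  cases hs : string.toList with
  | nil => exact absurd hs hne
  | cons c0 cs =>
      rw [PySem.List.pyGet?_zero_cons, PySem.List.pyGet?_neg_one]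
      cases hL : (c0 :: cs).getLast? with
      | none => simp at hL
      | some cl =>
          simp only
          split_ifs with hguard
          · rfl
          · push_neg at hguard
            obtain ⟨hop, hcl⟩ := hguard
            -- A side: the first character is an opening, so counted = true, count = 1
            have hA : entireLoopA opening closing (c0 :: cs).length 0 false 0 (c0 :: cs)
                = entireLoopA opening closing (c0 :: cs).length 1 true 1 cs := by
              simp [entireLoopA, hop]
            rw [hA, loopA_eq_chk opening closing (c0 :: cs).length cs 1 1
                  (by simp [List.length_cons]; omega)]
            -- B side: the canonical word starts with '('
            have hc0 : canonB opening closing c0 = some '(' := by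
              unfold canonB; rw [if_pos hop]
            rw [List.filterMap_cons_some hc0]
            cases hcs : cs with
            | nil =>
                -- seps = "(", so seps[-1] is '(' and B returns False, as does A
                subst hcs
                simp [chk, PySem.List.pyGet?_neg_one]
            | cons a as =>
                rw [← hcs]
                have hcsne : cs ≠ [] := by simp [hcs]
                have hlast : cs.getLast? = some cl := by
                  rw [hcs] at hL ⊢
                  rwa [List.getLast?_cons_cons] at hL
                have hclsep : (canonB opening closing cl).isSome := by
                  unfold canonB
                  by_cases h : String.mk [cl] = opening
                  · rw [if_pos h]; rfl
                  · rw [if_neg h, if_pos hcl]; rfl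
                rw [chk_filterMap opening closing cs 1 one_ne_zero
                      (by intro d hdm; rw [hlast] at hdm; simp at hdm; subst hdm; exact hclsep)]
                set L := cs.filterMap (canonB opening closing) with hLdef
                have hLne : L ≠ [] := by
                  obtain ⟨e, he⟩ := Option.isSome_iff_exists.mp hclsep
                  have : e ∈ L := List.mem_filterMap.mpr ⟨cl, List.mem_of_getLast? hlast, he⟩
                  intro hnil; rw [hnil] at this; simp at this
                rcases List.eq_nil_or_concat' L with hnil | ⟨M, b, hMb⟩
                · exact absurd hnil hLne
                · rw [hMb]
                  have hget : PySem.List.pyGet? ('(' :: (M ++ [b])) (-1) = some b := by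
                    rw [PySem.List.pyGet?_neg_one, show ('(' :: (M ++ [b])) = ('(' :: M) ++ [b] by simp,
                        List.getLast?_concat]
                  rw [hget]
                  have hapL : allParen (M ++ [b]) := by
                    rw [← hMb, hLdef]
                    exact allParen_filterMap opening closing cs
                  rw [chk_concat_dyck M b hapL]
                  have hinner : PySem.List.slice ('(' :: (M ++ [b])) (some 1) (some (-1)) = M := by
                    simp [PySem.List.slice]
                  simp only
                  by_cases hb : b = ')'
                  · rw [if_neg (by simp [hb])]
                    rw [hinner]
                    have hred := reduceB_eq_nil_iff M.length M
                      (fun e he => hapL e (List.mem_append_left _ he)) (by omega)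
                    by_cases hr : reduceB M.length M = []
                    · rw [decide_eq_true hr, hred.mp hr]
                      simp [hb]
                    · rw [decide_eq_false hr]
                      have hd : dyck M = false := by
                        rw [Bool.eq_false_iff]
                        intro hdt
                        exact hr (hred.mpr hdt)
                      simp [hd]
                  · rw [if_pos hb]
                    simp [hb]

-- ===== VERDICT (by name: the statement is the Claim_ definition above) =====
theorem entire_spec : Claim_equal_entire := by
  intro s opening closing _ hpre
  exact entire_eq_alt s opening closing hpre
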